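-- pv_equiv track=rewrite | github.com/j-a-h-i-r/leet | python/93.py | putDot
-- ===== SOURCE A (Python) =====
-- def putDot(segments, s):
--     chunks = []
--     start = 0
--     for i in segments:
--         chunks.append(s[start:i])
--         start = i
--     chunks.append(s[start:])
--     return ".".join(chunks)
-- ===== SOURCE B (Python) =====
-- def putDot(segments, s):
--     bounds = [0, *segments, len(s)]
--     def join(lo, hi):
--         if hi - lo <= 1:
--             return s[bounds[lo]:bounds[hi]]
--         mid = (lo + hi) // 2
--         return join(lo, mid) + "." + join(mid, hi)
--     return join(0, len(bounds) - 1)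
-- ===== Notes on version B (the rewrite author's own statement) =====
-- stated objective: alternative
-- what changed: B precomputes the boundary table [0]+segments+[len(s)] and builds the result by balanced divide-and-conquer over boundary index ranges (join halves with a dot), instead of A's sequential running-start loop that appends chunks to a list and joins at the end.
import Mathlib
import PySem

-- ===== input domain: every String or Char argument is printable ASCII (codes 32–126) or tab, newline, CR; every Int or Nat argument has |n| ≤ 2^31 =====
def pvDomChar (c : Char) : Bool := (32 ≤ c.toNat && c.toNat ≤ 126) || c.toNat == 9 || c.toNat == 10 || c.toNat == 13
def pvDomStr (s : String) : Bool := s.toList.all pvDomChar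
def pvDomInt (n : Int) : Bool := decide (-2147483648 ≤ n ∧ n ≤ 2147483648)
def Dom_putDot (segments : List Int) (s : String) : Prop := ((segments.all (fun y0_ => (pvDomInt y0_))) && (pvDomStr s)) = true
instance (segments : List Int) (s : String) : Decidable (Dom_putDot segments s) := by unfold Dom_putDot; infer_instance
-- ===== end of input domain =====

-- B builds the result by balanced divide-and-conquer over a precomputed boundary table instead of
-- A's sequential running-start append-then-join loop (alternative; same result, different algorithm).

-- ===== PORT A =====
def putDot (segments : List Int) (s : String) : String :=
  let st := segments.foldl
    (fun (p : List String × Int) i => (p.1 ++ [PySem.Str.slice s (some p.2) (some i)], i))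
    ([], 0)
  PySem.Str.join "." (st.1 ++ [PySem.Str.slice s (some st.2) none])

-- ===== PORT B =====
-- B's inner join(lo, hi) on code points; lo/hi are list indices into bounds, always 0 ≤ lo < hi,
-- so they are carried as Nat and bounds[lo] is PySem.List.pyGetD at a nonnegative in-range index (exact there).
def putDotDC (cs : List Char) (bounds : List Int) (lo hi : Nat) : List Char :=
  if hi - lo ≤ 1 then
    PySem.Chars.slice cs (some (PySem.List.pyGetD bounds (lo : Int) 0))
      (some (PySem.List.pyGetD bounds (hi : Int) 0))
  else
    let mid := (lo + hi) / 2
    putDotDC cs bounds lo mid ++ '.' :: putDotDC cs bounds mid hi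
termination_by hi - lo
decreasing_by all_goals omega

def putDot_alt (segments : List Int) (s : String) : String :=
  let bounds : List Int := 0 :: (segments ++ [PySem.Str.len s])
  String.ofList (putDotDC s.toList bounds 0 (bounds.length - 1))

-- ===== PRECONDITION & SPEC =====
def Spec_putDot (segments : List Int) (s : String) (out : String) : Prop := out = putDot_alt segments s
instance (segments : List Int) (s : String) (out : String) : Decidable (Spec_putDot segments s out) := by unfold Spec_putDot; infer_instance

-- ===== CLAIM (what is proved, stated in full; the proofs are below) =====
def Claim_equal_putDot : Prop := ∀ (segments : List Int) (s : String), Dom_putDot segments s → Spec_putDot segments s (putDot segments s)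

-- ===== LEMMAS AND PROOFS =====

-- A's chunk list, written as a recursive function (proof vocabulary only)
def chunksOf (cs : List Char) (prev : Int) : List Int → List (List Char)
  | [] => [PySem.Chars.slice cs (some prev) none]
  | i :: rest => PySem.Chars.slice cs (some prev) (some i) :: chunksOf cs i rest

-- linear reference form of B's recursion: n ≥ 1 chunks starting at boundary index lo
def linJoin (cs : List Char) (b : List Int) (lo : Nat) : Nat → List Char
  | 0 => []
  | 1 => PySem.Chars.slice cs (some (b.getD lo 0)) (some (b.getD (lo + 1) 0))
  | n + 2 => PySem.Chars.slice cs (some (b.getD lo 0)) (some (b.getD (lo + 1) 0))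
      ++ '.' :: linJoin cs b (lo + 1) (n + 1)

-- A's fold produces exactly chunksOf (on the char level, after mapping toList)
theorem fold_eq_chunks (s : String) (segs : List Int) (acc : List String) (start : Int) :
    (let r := segs.foldl
        (fun (p : List String × Int) i => (p.1 ++ [PySem.Str.slice s (some p.2) (some i)], i))
        (acc, start);
      (r.1 ++ [PySem.Str.slice s (some r.2) none]).map String.toList)
    = acc.map String.toList ++ chunksOf s.toList start segs := by
  induction segs generalizing acc start with
  | nil => simp [chunksOf, PySem.Str.toList_slice]
  | cons i rest ih =>
    simp only [List.foldl_cons]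
    rw [ih]
    simp [chunksOf, PySem.Str.toList_slice]

-- s[a:] = s[a:len(s)] on code points
theorem slice_none_eq_len (cs : List Char) (a : Int) :
    PySem.Chars.slice cs (some a) none = PySem.Chars.slice cs (some a) (some (cs.length : Int)) := by
  simp [PySem.Chars.slice, PySem.List.slice]

theorem getD_drop (b : List Int) (lo k : Nat) :
    b.getD (lo + k) 0 = (b.drop lo).getD k 0 := by
  simp [List.getD, List.getElem?_drop]

-- join with a "." over a cons with nonempty tail
theorem join_cons_of_ne_nil (x : List Char) (l : List (List Char)) (h : l ≠ []) :
    PySem.Chars.join ['.'] (x :: l) = x ++ '.' :: PySem.Chars.join ['.'] l := by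
  cases l with
  | nil => exact absurd rfl h
  | cons y r => rw [PySem.Chars.join_cons_cons]; simp

-- joining A's chunks equals the linear reference form, at any boundary offset lo
theorem chunks_to_lin (cs : List Char) (b : List Int) (segs : List Int) (prev : Int) (lo : Nat)
    (h : b.drop lo = prev :: (segs ++ [(cs.length : Int)])) :
    PySem.Chars.join ['.'] (chunksOf cs prev segs) = linJoin cs b lo (segs.length + 1) := by
  induction segs generalizing prev lo with
  | nil =>
    have h0 : b.getD lo 0 = prev := by
      have := getD_drop b lo 0; rw [h] at this; simpa using this
    have h1 : b.getD (lo + 1) 0 = (cs.length : Int) := by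
      have := getD_drop b lo 1; rw [h] at this; simpa using this
    show PySem.Chars.join ['.'] [PySem.Chars.slice cs (some prev) none] = linJoin cs b lo 1
    rw [PySem.Chars.join_singleton, slice_none_eq_len]
    simp only [linJoin]
    rw [h0, h1]
  | cons i rest ih =>
    have h0 : b.getD lo 0 = prev := by
      have := getD_drop b lo 0; rw [h] at this; simpa using this
    have h1 : b.getD (lo + 1) 0 = i := by
      have := getD_drop b lo 1; rw [h] at this; simpa using this
    have h' : b.drop (lo + 1) = i :: (rest ++ [(cs.length : Int)]) := by
      have : b.drop (lo + 1) = (b.drop lo).drop 1 := by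
        rw [List.drop_drop]
      rw [this, h]; simp
    have hne : chunksOf cs i rest ≠ [] := by cases rest <;> simp [chunksOf]
    show PySem.Chars.join ['.'] (PySem.Chars.slice cs (some prev) (some i) :: chunksOf cs i rest) = _
    rw [join_cons_of_ne_nil _ _ hne, ih i (lo + 1) h']
    show _ = linJoin cs b lo (rest.length + 2)
    simp only [linJoin]
    rw [h0, h1]

-- splitting the linear form at any interior point
theorem linJoin_split (cs : List Char) (b : List Int) (lo m n : Nat) (hm : 1 ≤ m) (hn : 1 ≤ n) :
    linJoin cs b lo m ++ '.' :: linJoin cs b (lo + m) n = linJoin cs b lo (m + n) := by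
  induction m generalizing lo with
  | zero => omega
  | succ m ih =>
    cases m with
    | zero =>
      cases n with
      | zero => omega
      | succ n =>
        rw [show 1 + (n + 1) = n + 2 by omega]
        simp [linJoin]
    | succ m =>
      have : linJoin cs b lo (m + 1 + 1) =
          PySem.Chars.slice cs (some (b.getD lo 0)) (some (b.getD (lo + 1) 0))
            ++ '.' :: linJoin cs b (lo + 1) (m + 1) := by
        simp [linJoin]
      rw [this, List.append_assoc, List.cons_append]
      rw [show lo + (m + 1 + 1) = (lo + 1) + (m + 1) by omega] at *
      rw [ih (lo + 1) (by omega)]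
      have hsum : m + 1 + n = (m + n) + 1 := by omega
      cases hn' : m + n with
      | zero => omega
      | succ k =>
        simp only [linJoin, hsum, hn']
        rw [show m + 1 + 1 + n = k + 1 + 2 by omega]
        simp [linJoin]

-- B's divide-and-conquer equals the linear form
theorem dc_eq_lin (cs : List Char) (b : List Int) (lo hi : Nat) (h : lo < hi) :
    putDotDC cs b lo hi = linJoin cs b lo (hi - lo) := by
  induction hn : hi - lo using Nat.strong_induction_on generalizing lo hi with
  | _ n ih =>
    by_cases hb : hi - lo ≤ 1
    · have hhi : hi = lo + 1 := by omega
      subst hhi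
      rw [putDotDC, if_pos (by omega)]
      rw [PySem.List.pyGetD_natCast, PySem.List.pyGetD_natCast, ← hn,
          show lo + 1 - lo = 1 by omega]
      simp only [linJoin]
    · rw [putDotDC]
      simp only [if_neg hb]
      have hmid1 : lo < (lo + hi) / 2 := by omega
      have hmid2 : (lo + hi) / 2 < hi := by omega
      rw [ih ((lo + hi) / 2 - lo) (by omega) lo ((lo + hi) / 2) hmid1 rfl,
          ih (hi - (lo + hi) / 2) (by omega) ((lo + hi) / 2) hi hmid2 rfl]
      have := linJoin_split cs b lo ((lo + hi) / 2 - lo) (hi - (lo + hi) / 2)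
        (by omega) (by omega)
      rw [show lo + ((lo + hi) / 2 - lo) = (lo + hi) / 2 by omega] at this
      rw [this, ← hn]
      congr 1
      omega

-- ===== VERDICT (by name: the statement is the Claim_ definition above) =====
theorem putDot_spec : Claim_equal_putDot := by
  intro segments s _
  show putDot segments s = putDot_alt segments s
  simp only [putDot, putDot_alt, PySem.Str.join]
  rw [fold_eq_chunks s segments [] 0]
  simp only [List.map_nil, List.nil_append]
  have hb : (0 :: (segments ++ [PySem.Str.len s])).drop 0
      = (0 : Int) :: (segments ++ [(s.toList.length : Int)]) := by
    simp [PySem.Str.len_eq]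
  have hlen : (0 :: (segments ++ [PySem.Str.len s])).length - 1 = segments.length + 1 := by
    simp
  rw [show (".".toList) = ['.'] from rfl,
      chunks_to_lin s.toList (0 :: (segments ++ [PySem.Str.len s])) segments 0 0 hb,
      dc_eq_lin s.toList _ 0 _ (by simp), hlen]
  rfl
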